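-- pv_equiv track=rewrite | github.com/TarekElshami/ExamValidator | exam_validator.py | calculate_file_hash
-- ===== SOURCE A (Python) =====
-- def calculate_file_hash(content):
--     hash_value = 29366927
--     if isinstance(content, str):
--         content = content.encode('utf-8')
--
--     for i, byte in enumerate(content):
--         mult = 1 if (i % 2) == 0 else 100
--         signed_byte = byte if byte < 128 else byte - 256
--         hash_value += signed_byte * mult
--
--     return hash_value
-- ===== SOURCE B (Python) =====
-- def calculate_file_hash(content):
--     if isinstance(content, str):
--         content = content.encode('utf-8')
--     # Histogram pass: bin index = parity*256 + byte value.
--     counts = [0] * 512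
--     parity = 0
--     for b in content:
--         counts[parity + b] += 1
--         parity ^= 256
--     # Closed-form sum over the 512 bins (independent of input length).
--     h = 29366927
--     for v in range(512):
--         byte = v % 256
--         signed = byte - 256 if byte >= 128 else byte
--         weight = 100 if v >= 256 else 1
--         h += counts[v] * signed * weight
--     return h
-- ===== Notes on version B (the rewrite author's own statement) =====
-- stated objective: alternative
-- what changed: B replaces A's direct per-element accumulation (enumerate loop with an i%2 weight branch) by a 512-bin frequency table keyed by (index parity, byte value) built in one pass, followed by a weighted sum over the 512 bins; correct because the hash is linear in the occurrence counts of each (parity, byte) pair.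
import Mathlib
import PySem

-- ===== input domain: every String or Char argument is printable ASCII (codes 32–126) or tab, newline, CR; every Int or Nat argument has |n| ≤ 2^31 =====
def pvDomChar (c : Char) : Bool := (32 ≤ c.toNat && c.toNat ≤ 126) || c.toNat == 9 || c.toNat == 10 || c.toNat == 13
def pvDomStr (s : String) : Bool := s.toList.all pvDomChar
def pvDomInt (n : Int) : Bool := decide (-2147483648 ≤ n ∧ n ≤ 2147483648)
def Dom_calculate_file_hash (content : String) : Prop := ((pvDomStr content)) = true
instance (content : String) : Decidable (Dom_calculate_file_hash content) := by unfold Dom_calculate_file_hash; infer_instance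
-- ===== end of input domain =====

-- B replaces the per-element weighted accumulation by a 512-bin frequency table
-- keyed by (index parity, byte) plus a weighted sum over the bins; same cost,
-- different algorithm/data structure.

-- ===== PORT A =====
-- content.encode('utf-8'): on the ASCII domain the UTF-8 bytes are exactly the code points.
def pvBytes (content : String) : List Int :=
  content.toList.map (fun c => (c.toNat : Int))

def calculate_file_hash (content : String) : Int :=
  (PySem.List.enumerate (pvBytes content) 0).foldl
    (fun hash_value p =>
      let mult : Int := if PySem.Int.mod p.1 2 = 0 then 1 else 100
      let signed_byte : Int := if p.2 < 128 then p.2 else p.2 - 256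
      hash_value + signed_byte * mult)
    29366927

-- ===== PORT B =====
-- first loop of Source B: `counts[parity + b] += 1; parity ^= 256`.
-- Index `parity + b` is a Nat here (in Python it is a nonnegative int: parity ∈ {0,256}, b a byte).
def pvBuild (counts : List Int) (parity : Nat) : List Int → List Int
  | [] => counts
  | b :: rest =>
      pvBuild (counts.set (parity + b.toNat) (counts.getD (parity + b.toNat) 0 + 1))
        (parity ^^^ 256) rest

-- body of Source B's second loop: `h += counts[v] * signed * weight`
def pvBinStep (counts : List Int) (h : Int) (v : Nat) : Int :=
  let byte : Int := ((v % 256 : Nat) : Int)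
  let signed : Int := if 128 ≤ byte then byte - 256 else byte
  let weight : Int := if 256 ≤ v then 100 else 1
  h + counts.getD v 0 * signed * weight

def calculate_file_hash_alt (content : String) : Int :=
  let counts := pvBuild (List.replicate 512 0) 0 (pvBytes content)
  (List.range 512).foldl (pvBinStep counts) 29366927

-- ===== PRECONDITION & SPEC =====
def Spec_calculate_file_hash (content : String) (out : Int) : Prop := out = calculate_file_hash_alt content
instance (content : String) (out : Int) : Decidable (Spec_calculate_file_hash content out) := by unfold Spec_calculate_file_hash; infer_instance

-- ===== CLAIM (what is proved, stated in full; the proofs are below) =====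
def Claim_equal_calculate_file_hash : Prop := ∀ (content : String), Dom_calculate_file_hash content → Spec_calculate_file_hash content (calculate_file_hash content)

-- ===== LEMMAS AND PROOFS =====

-- the signed weighted contribution of one element of bin v
def pvSw (v : Nat) : Int :=
  (if 128 ≤ ((v % 256 : Nat) : Int) then ((v % 256 : Nat) : Int) - 256 else ((v % 256 : Nat) : Int))
    * (if 256 ≤ v then 100 else 1)

-- the common mathematical value: weighted signed sum, parity tracked as a Bool
def pvWsum : Bool → List Int → Int
  | _, [] => 0
  | odd, b :: rest =>
      (if b < 128 then b else b - 256) * (if odd then 100 else 1) + pvWsum (!odd) rest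

theorem pvFold_shift : ∀ (vs : List Nat) (counts : List Int) (h d : Int),
    vs.foldl (pvBinStep counts) (h + d) = vs.foldl (pvBinStep counts) h + d
  | [], _, _, _ => rfl
  | v :: vs, counts, h, d => by
      simp only [List.foldl_cons, pvBinStep]
      rw [add_right_comm]
      exact pvFold_shift vs counts _ d

-- reading / one step after bumping bin k changes exactly bin k
theorem pvStep_set (counts : List Int) (k v : Nat) (h : Int) (hk : k < counts.length) :
    pvBinStep (counts.set k (counts.getD k 0 + 1)) h v
      = pvBinStep counts h v + (if v = k then pvSw k else 0) := by
  by_cases hvk : v = k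
  · subst hvk
    have hread : ∀ x : Int, (counts.set v x)[v]? = some x :=
      fun x => List.getElem?_set_eq_of_lt _ hk
    simp only [pvBinStep, pvSw, List.getD_eq_getElem?_getD, hread, Option.getD_some,
      if_pos rfl, ite_true]
    ring
  · have hread : ∀ x : Int, (counts.set k x)[v]? = counts[v]? :=
      fun _ => List.getElem?_set_ne (fun h => hvk h.symm)
    simp [pvBinStep, List.getD_eq_getElem?_getD, hread, hvk]

theorem pvFold_set : ∀ (vs : List Nat) (counts : List Int) (k : Nat) (h : Int),
    k < counts.length →
    vs.foldl (pvBinStep (counts.set k (counts.getD k 0 + 1))) h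
      = vs.foldl (pvBinStep counts) h + (vs.count k) * pvSw k
  | [], _, _, _, _ => by simp
  | v :: vs, counts, k, h, hk => by
      simp only [List.foldl_cons, pvStep_set counts k v h hk, List.count_cons]
      rw [pvFold_set vs counts k _ hk, pvFold_shift]
      by_cases hvk : v = k <;> simp [hvk] <;> push_cast <;> ring
  termination_by vs => vs.length

set_option maxRecDepth 4000 in
theorem pvFold_zero : ∀ (vs : List Nat) (h : Int),
    vs.foldl (pvBinStep (List.replicate 512 0)) h = h
  | [], _ => rfl
  | v :: vs, h => by
      have hread : (List.replicate 512 (0:Int)).getD v 0 = 0 := by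
        rw [List.getD_eq_getElem?_getD]
        rcases Nat.lt_or_ge v 512 with hv | hv
        · rw [List.getElem?_replicate_of_lt hv]; rfl
        · rw [List.getElem?_eq_none (by simpa using hv)]; rfl
      simp only [List.foldl_cons, pvBinStep, hread, zero_mul, add_zero]
      exact pvFold_zero vs h

theorem pv_build_sum : ∀ (bs : List Int) (counts : List Int) (odd : Bool),
    counts.length = 512 → (∀ b ∈ bs, 0 ≤ b ∧ b < 256) →
    (List.range 512).foldl (pvBinStep (pvBuild counts (if odd then 256 else 0) bs)) 29366927
      = (List.range 512).foldl (pvBinStep counts) 29366927 + pvWsum odd bs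
  | [], counts, odd, _, _ => by simp [pvBuild, pvWsum]
  | b :: bs, counts, odd, hlen, hb => by
      obtain ⟨hb0, hb256⟩ := hb b (List.mem_cons_self ..)
      have hbn : b.toNat < 256 := by omega
      have hcast : ((b.toNat : Nat) : Int) = b := Int.toNat_of_nonneg hb0
      have hbtail : ∀ x ∈ bs, 0 ≤ x ∧ x < 256 := fun x hx => hb x (List.mem_cons_of_mem _ hx)
      cases odd
      · -- even position: bin k = 0 + b.toNat, weight 1
        have hk : 0 + b.toNat < counts.length := by omega
        have hrec := pv_build_sum bs (counts.set (0 + b.toNat) (counts.getD (0 + b.toNat) 0 + 1))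
          true (by rw [List.length_set, hlen]) hbtail
        simp only [Bool.not_false, ite_true] at hrec
        simp only [pvBuild, ite_true, ite_false, if_neg (Bool.false_ne_true),
          show (0 ^^^ 256 : Nat) = 256 from rfl, pvWsum, Bool.not_false]
        rw [hrec, pvFold_set _ counts _ _ hk]
        have hcnt : (List.range 512).count (0 + b.toNat) = 1 :=
          List.count_eq_one_of_mem List.nodup_range (List.mem_range.mpr (by omega))
        have hsw : pvSw (0 + b.toNat) = (if b < 128 then b else b - 256) * 1 := by
          unfold pvSw
          rw [show (0 + b.toNat) % 256 = b.toNat from by omega, hcast,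
            if_neg (by omega : ¬ 256 ≤ 0 + b.toNat)]
          by_cases hlt : b < 128
          · rw [if_neg (by omega), if_pos hlt]
          · rw [if_pos (by omega), if_neg hlt]
        rw [hcnt, hsw]
        push_cast
        ring
      · -- odd position: bin k = 256 + b.toNat, weight 100
        have hk : 256 + b.toNat < counts.length := by omega
        have hrec := pv_build_sum bs (counts.set (256 + b.toNat) (counts.getD (256 + b.toNat) 0 + 1))
          false (by rw [List.length_set, hlen]) hbtail
        simp only [ite_false, if_neg (Bool.false_ne_true)] at hrec
        simp only [pvBuild, ite_true, ite_false, show (256 ^^^ 256 : Nat) = 0 from rfl,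
          pvWsum, Bool.not_true, if_neg (Bool.false_ne_true)]
        rw [hrec, pvFold_set _ counts _ _ hk]
        have hcnt : (List.range 512).count (256 + b.toNat) = 1 :=
          List.count_eq_one_of_mem List.nodup_range (List.mem_range.mpr (by omega))
        have hsw : pvSw (256 + b.toNat) = (if b < 128 then b else b - 256) * 100 := by
          unfold pvSw
          rw [show (256 + b.toNat) % 256 = b.toNat from by omega, hcast,
            if_pos (by omega : 256 ≤ 256 + b.toNat)]
          by_cases hlt : b < 128
          · rw [if_neg (by omega), if_pos hlt]
          · rw [if_pos (by omega), if_neg hlt]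
        rw [hcnt, hsw]
        push_cast
        ring
  termination_by bs => bs.length

-- A's fold over `enumerate bs s` equals the weighted signed sum, parity of s as a Bool.
theorem pv_enum_wsum : ∀ (bs : List Int) (h s : Int) (odd : Bool),
    PySem.Int.mod s 2 = (if odd then 1 else 0) →
    (PySem.List.enumerate bs s).foldl
      (fun hash_value p =>
        let mult : Int := if PySem.Int.mod p.1 2 = 0 then 1 else 100
        let signed_byte : Int := if p.2 < 128 then p.2 else p.2 - 256
        hash_value + signed_byte * mult) h
    = h + pvWsum odd bs
  | [], h, s, odd, _ => by simp [pvWsum]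
  | b :: bs, h, s, odd, hs => by
      rw [PySem.Int.mod_eq_emod_of_pos (by norm_num : (0:Int) < 2)] at hs
      have hs1 : PySem.Int.mod (s + 1) 2 = (if (!odd) then 1 else 0) := by
        rw [PySem.Int.mod_eq_emod_of_pos (by norm_num : (0:Int) < 2)]
        cases odd <;> simp_all <;> omega
      have hrec := pv_enum_wsum bs
        (h + (if b < 128 then b else b - 256) * (if odd then 100 else 1)) (s + 1) (!odd) hs1
      have hmult : (if PySem.Int.mod s 2 = 0 then (1:Int) else 100) = (if odd then 100 else 1) := by
        rw [PySem.Int.mod_eq_emod_of_pos (by norm_num : (0:Int) < 2), hs]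
        cases odd <;> simp
      simp only [PySem.List.enumerate_cons, List.foldl_cons, hmult] at *
      rw [hrec]
      simp only [pvWsum]
      ring
  termination_by bs => bs.length

-- ===== VERDICT (by name: the statement is the Claim_ definition above) =====
theorem calculate_file_hash_spec : Claim_equal_calculate_file_hash := by
  intro content hdom
  unfold Spec_calculate_file_hash calculate_file_hash calculate_file_hash_alt
  have hbs : ∀ b ∈ pvBytes content, 0 ≤ b ∧ b < 256 := by
    intro b hb
    obtain ⟨c, hc, rfl⟩ := List.mem_map.mp hb
    have hdc : pvDomChar c = true := (List.all_eq_true.mp hdom) c hc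
    simp only [pvDomChar, Bool.or_eq_true, Bool.and_eq_true, decide_eq_true_eq,
      beq_iff_eq] at hdc
    have hlt : c.toNat < 256 := by rcases hdc with ((⟨h1, h2⟩ | h) | h) | h <;> omega
    exact ⟨Int.natCast_nonneg _, by exact_mod_cast hlt⟩
  rw [pv_enum_wsum (pvBytes content) 29366927 0 false (by decide)]
  have hB := pv_build_sum (pvBytes content) (List.replicate 512 0) false
    List.length_replicate hbs
  simp only [if_neg (Bool.false_ne_true)] at hB
  rw [hB, pvFold_zero]
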